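-- pv_equiv track=rewrite | github.com/Roxabi/roxabi-plugins | plugins/web-intel/scripts/gpu_detector.py | list_pulled_vision_models
-- ===== SOURCE A (Python) =====
-- VISION_MODELS = [
--     {"name": "qwen3-vl:32b", "vram_mb": 20000, "quality": "best"},
--     {"name": "qwen3-vl:8b", "vram_mb": 6000, "quality": "high"},
--     {"name": "qwen3-vl:4b", "vram_mb": 3500, "quality": "good"},
--     {"name": "qwen3-vl:2b", "vram_mb": 2000, "quality": "basic"},
-- ]
--
-- def list_pulled_vision_models(ollama_models: list[str]) -> list[str]:
--     """Return which vision models are already pulled.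
--
--     Matches exact name (e.g. 'qwen3-vl:4b') or base name when Ollama
--     uses a more specific tag (e.g. 'qwen3-vl:4b-fp16' matches 'qwen3-vl:4b').
--     """
--     pulled = []
--     for vm in VISION_MODELS:
--         vm_name = vm["name"]
--         vm_base = vm_name.split(":")[0]
--         vm_tag = vm_name.split(":")[1] if ":" in vm_name else ""
--
--         for om in ollama_models:
--             om_base = om.split(":")[0]
--             om_tag = om.split(":")[1] if ":" in om else ""
--
--             if vm_name == om:
--                 pulled.append(vm_name)
--                 break
--             # Match if base name + tag prefix match (e.g. "4b" in "4b-fp16")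
--             if vm_base == om_base and om_tag.startswith(vm_tag):
--                 pulled.append(vm_name)
--                 break
--
--     return pulled
-- ===== SOURCE B (Python) =====
-- VISION_MODELS = [
--     {"name": "qwen3-vl:32b", "vram_mb": 20000, "quality": "best"},
--     {"name": "qwen3-vl:8b", "vram_mb": 6000, "quality": "high"},
--     {"name": "qwen3-vl:4b", "vram_mb": 3500, "quality": "good"},
--     {"name": "qwen3-vl:2b", "vram_mb": 2000, "quality": "basic"},
-- ]
--
--
-- def _base_tag(name):
--     parts = name.split(":")
--     return parts[0], parts[1] if ":" in name else ""
--
--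
-- def list_pulled_vision_models(ollama_models: list[str]) -> list[str]:
--     # One pass builds an index base -> list of tags; each vision model is
--     # then a single lookup instead of a scan over ollama_models.
--     tags_by_base = {}
--     for om in ollama_models:
--         base, tag = _base_tag(om)
--         tags_by_base.setdefault(base, []).append(tag)
--     pulled = []
--     for vm in VISION_MODELS:
--         base, tag = _base_tag(vm["name"])
--         if any(t.startswith(tag) for t in tags_by_base.get(base, [])):
--             pulled.append(vm["name"])
--     return pulled
-- ===== Notes on version B (the rewrite author's own statement) =====
-- stated objective: alternative
-- what changed: A rescans ollama_models (with a break) once per vision model; B builds a base-name -> tags index in one pass over ollama_models (setdefault/append) and decides each vision model by a single dict lookup plus a prefix test over its tags, dropping the now-redundant exact-name branch.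
import Mathlib
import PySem

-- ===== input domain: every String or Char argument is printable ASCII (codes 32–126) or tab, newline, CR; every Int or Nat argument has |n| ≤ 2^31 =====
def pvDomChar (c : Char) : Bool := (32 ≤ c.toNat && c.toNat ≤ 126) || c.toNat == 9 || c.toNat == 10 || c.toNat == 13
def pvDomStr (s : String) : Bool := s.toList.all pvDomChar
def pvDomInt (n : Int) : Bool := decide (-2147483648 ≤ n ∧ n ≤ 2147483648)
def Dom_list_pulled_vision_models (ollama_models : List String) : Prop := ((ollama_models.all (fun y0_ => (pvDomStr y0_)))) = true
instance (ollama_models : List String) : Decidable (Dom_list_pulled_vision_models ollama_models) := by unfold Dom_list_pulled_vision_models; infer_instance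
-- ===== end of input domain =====

-- B replaces A's inner scan of ollama_models with a one-pass index (base name -> tags) and
-- one lookup per vision model, splitting each ollama model string only once.

-- VISION_MODELS: only the "name" field is read by the function; the unused
-- "vram_mb"/"quality" fields are omitted from the port.
def VISION_MODEL_NAMES : List String :=
  ["qwen3-vl:32b", "qwen3-vl:8b", "qwen3-vl:4b", "qwen3-vl:2b"]

-- ===== PORT A =====
-- the inner `for om in ollama_models: … break` loop of A, returning whether vm matched;
-- s.split(":") is ported as (PySem.Str.split? s ":").getD [] (exact: sep ≠ "" so split? = some),
-- and parts[1] as (parts.drop 1).headD "" — exact because the `":" in s` guard ensures parts[1] exists.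
def pvAScan (vm_name vm_base vm_tag : String) : List String → Bool
  | [] => false
  | om :: rest =>
      let om_base := ((PySem.Str.split? om ":").getD []).headD ""
      let om_tag := if PySem.Str.isIn ":" om then (((PySem.Str.split? om ":").getD []).drop 1).headD "" else ""
      if vm_name == om then true
      else if vm_base == om_base && PySem.Str.startswith om_tag vm_tag then true
      else pvAScan vm_name vm_base vm_tag rest

def list_pulled_vision_models (ollama_models : List String) : List String :=
  VISION_MODEL_NAMES.foldl (fun pulled vm_name =>
    let vm_base := ((PySem.Str.split? vm_name ":").getD []).headD ""
    let vm_tag := if PySem.Str.isIn ":" vm_name then (((PySem.Str.split? vm_name ":").getD []).drop 1).headD "" else ""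
    if pvAScan vm_name vm_base vm_tag ollama_models then pulled ++ [vm_name] else pulled) []

-- ===== PORT B =====
-- Source B's helper _base_tag (same split?/guard porting as above)
def pvBaseTag (name : String) : String × String :=
  let parts := (PySem.Str.split? name ":").getD []
  (parts.headD "", if PySem.Str.isIn ":" name then (parts.drop 1).headD "" else "")

-- the index-building pass: base name -> list of its tags, in input order
-- (setdefault(base, []).append(tag) is ported as Dict.modify with default [])
def pvIndex (ollama_models : List String) : PySem.Dict String (List String) :=
  ollama_models.foldl (fun d om =>
    let bt := pvBaseTag om
    d.modify bt.1 [] (· ++ [bt.2])) PySem.Dict.empty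

def list_pulled_vision_models_alt (ollama_models : List String) : List String :=
  let idx := pvIndex ollama_models
  VISION_MODEL_NAMES.foldl (fun pulled vm_name =>
    let bt := pvBaseTag vm_name
    if (idx.getD bt.1 []).any (fun t => PySem.Str.startswith t bt.2) then pulled ++ [vm_name]
    else pulled) []

-- ===== PRECONDITION & SPEC =====
def Spec_list_pulled_vision_models (ollama_models : List String) (out : List String) : Prop := out = list_pulled_vision_models_alt ollama_models
instance (ollama_models : List String) (out : List String) : Decidable (Spec_list_pulled_vision_models ollama_models out) := by unfold Spec_list_pulled_vision_models; infer_instance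

-- ===== CLAIM (what is proved, stated in full; the proofs are below) =====
def Claim_equal_list_pulled_vision_models : Prop := ∀ (ollama_models : List String), Dom_list_pulled_vision_models ollama_models → Spec_list_pulled_vision_models ollama_models (list_pulled_vision_models ollama_models)

-- ===== LEMMAS AND PROOFS =====

-- tags of the models sharing a given base, in input order
def pvTagsOf (base : String) (oms : List String) : List String :=
  (oms.filter (fun om => (pvBaseTag om).1 == base)).map (fun om => (pvBaseTag om).2)

theorem pvStartswithC_self (l : List Char) : PySem.Chars.startswith l l = true := by
  rw [PySem.Chars.startswith_iff]

theorem pvAScan_cons (n b t om : String) (rest : List String) :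
    pvAScan n b t (om :: rest)
      = (if n == om then true
         else if b == (pvBaseTag om).1 && PySem.Str.startswith (pvBaseTag om).2 t then true
         else pvAScan n b t rest) := rfl

theorem pvIndex_getD (oms : List String) (d : PySem.Dict String (List String)) (base : String) :
    (oms.foldl (fun d om =>
      let bt := pvBaseTag om
      d.modify bt.1 [] (· ++ [bt.2])) d).getD base []
      = d.getD base [] ++ pvTagsOf base oms := by
  induction oms generalizing d with
  | nil => simp [pvTagsOf]
  | cons om rest ih =>
      simp only [List.foldl_cons, ih, pvTagsOf, List.filter_cons]
      by_cases h : (pvBaseTag om).1 = base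
      · subst h
        simp [PySem.Dict.getD_modify_self]
      · simp [PySem.Dict.getD_modify_of_ne _ _ _ (Ne.symm h), h]

theorem pvAScan_eq (vm_name : String) (oms : List String) :
    pvAScan vm_name (pvBaseTag vm_name).1 (pvBaseTag vm_name).2 oms
      = (pvTagsOf (pvBaseTag vm_name).1 oms).any
          (fun t => PySem.Str.startswith t (pvBaseTag vm_name).2) := by
  induction oms with
  | nil => rfl
  | cons om rest ih =>
      simp only [pvAScan_cons, pvTagsOf, List.filter_cons]
      by_cases he : vm_name = om
      · subst he
        simp [pvStartswithC_self]
      · have hne : (vm_name == om) = false := by simp [he]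
        by_cases hb : (pvBaseTag vm_name).1 = (pvBaseTag om).1
        · have hb1 : ((pvBaseTag vm_name).1 == (pvBaseTag om).1) = true := by simp [hb]
          have hb2 : ((pvBaseTag om).1 == (pvBaseTag vm_name).1) = true := by simp [hb]
          by_cases hs : PySem.Chars.startswith (pvBaseTag om).2.toList (pvBaseTag vm_name).2.toList = true
          · simp [hne, hb1, hb2, hs]
          · rw [Bool.not_eq_true] at hs
            simp [hne, hb1, hb2, hs, ih, pvTagsOf]
        · have hb1 : ((pvBaseTag vm_name).1 == (pvBaseTag om).1) = false := by simp [hb]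
          have hb2 : ((pvBaseTag om).1 == (pvBaseTag vm_name).1) = false := by simp [Ne.symm hb]
          simp [hne, hb1, hb2, ih, pvTagsOf]

-- A's inner-loop outcome equals B's lookup-and-any, stated in A's inline form
theorem pvCond_eq (vm_name : String) (oms : List String) :
    pvAScan vm_name (((PySem.Str.split? vm_name ":").getD []).headD "")
      (if PySem.Str.isIn ":" vm_name then (((PySem.Str.split? vm_name ":").getD []).drop 1).headD "" else "") oms
      = ((pvIndex oms).getD (pvBaseTag vm_name).1 []).any
          (fun t => PySem.Str.startswith t (pvBaseTag vm_name).2) := by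
  have h1 : (pvIndex oms).getD (pvBaseTag vm_name).1 [] = pvTagsOf (pvBaseTag vm_name).1 oms := by
    unfold pvIndex
    rw [pvIndex_getD]
    simp
  rw [h1]
  exact pvAScan_eq vm_name oms

-- ===== VERDICT (by name: the statement is the Claim_ definition above) =====
theorem list_pulled_vision_models_spec : Claim_equal_list_pulled_vision_models := by
  intro oms _
  unfold Spec_list_pulled_vision_models list_pulled_vision_models list_pulled_vision_models_alt
  simp only [VISION_MODEL_NAMES, List.foldl_cons, List.foldl_nil, pvCond_eq]
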